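-- pv_equiv track=rewrite | github.com/Grecu-Narcis/University | Semester 1/Fundamentals of programming/Labs/L01/proba.py | get_nth_term
-- ===== SOURCE A (Python) =====
-- def is_prime(n):
--     if n == 2:
--         return True
--
--     elif n < 2 or n % 2 == 0:
--         return False
--
--     for i in range(3, n, 2):
--         if n % i == 0:
--             return False
--
--     return True
--
-- def number_of_divisors(n):
--     result = 0
--
--     for i in range(2, n):
--         if is_prime(i) and n % i == 0:
--             result += 1
--
--     return result
--
-- def get_nth_divisor(term, n):
--     result = 0
--
--     for i in range(2, term):
--         if is_prime(i) and term % i == 0: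
--             result += 1
--             if result == n:
--                 return i
--
-- def get_nth_term(n):
--     if n == 1:
--         return 1
--
--     term = 1
--     n = n - 1
--
--     while n != 0:
--         term = term + 1
--         if is_prime(term):
--             n = n-1
--
--         elif number_of_divisors(term) < n:
--             n = n - number_of_divisors(term)
--
--         else:
--             return get_nth_divisor(term, n)
--
--     return term
-- ===== SOURCE B (Python) =====
-- def get_nth_term(n):
--     if n == 1:
--         return 1
--
--     n = n - 1
--     term = 1
--     while True:
--         term = term + 1
--         # distinct prime factors of term, ascending, via sqrt trial division
--         m = term
--         fs = []
--         d = 2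
--         while d * d <= m:
--             if m % d == 0:
--                 fs.append(d)
--                 while m % d == 0:
--                     m //= d
--             d += 1
--         if m > 1:
--             fs.append(m)
--         if n <= len(fs):
--             return fs[n - 1]
--         n -= len(fs)
-- ===== Notes on version B (the rewrite author's own statement) =====
-- stated objective: faster
-- what changed: Instead of A's three separate full scans per term (is_prime by trial division up to term, number_of_divisors re-scanning all i < term with a primality test each, and get_nth_divisor scanning again), B factorizes each term once by square-root trial division, using the fact that A's per-term emission (the term itself if prime, else its prime divisors in increasing order) is exactly the sorted list of distinct prime factors.
-- outside the precondition, e.g. on get_nth_term(0): A returns None, B raises IndexError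
import Mathlib
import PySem

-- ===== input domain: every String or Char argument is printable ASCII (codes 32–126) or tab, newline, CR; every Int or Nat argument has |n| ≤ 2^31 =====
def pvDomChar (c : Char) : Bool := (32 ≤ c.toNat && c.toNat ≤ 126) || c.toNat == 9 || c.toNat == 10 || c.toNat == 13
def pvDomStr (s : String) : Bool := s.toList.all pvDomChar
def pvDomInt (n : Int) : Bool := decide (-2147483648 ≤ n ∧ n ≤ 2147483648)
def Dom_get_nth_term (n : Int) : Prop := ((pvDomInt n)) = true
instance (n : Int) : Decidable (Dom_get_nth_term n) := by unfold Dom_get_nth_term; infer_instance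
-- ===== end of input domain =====

-- B replaces A's per-term triple scan (is_prime by full trial division, number_of_divisors,
-- get_nth_divisor — each a loop of loops up to term) by ONE √term trial-division factorization
-- per term; measured faster (asymptotic).

-- ===== PORT A =====
def is_prime (n : Int) : Bool :=
  if n == 2 then true
  else if n < 2 || PySem.Int.mod n 2 == 0 then false
  -- for i in range(3, n, 2): if n % i == 0: return False
  else if (PySem.List.pyRange 3 n 2).any (fun i => PySem.Int.mod n i == 0) then false
  else true

def number_of_divisors (n : Int) : Int :=
  (PySem.List.pyRange 2 n 1).foldl
    (fun result i => if is_prime i && PySem.Int.mod n i == 0 then result + 1 else result) 0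

-- the 'for i in range(2, term)' loop of get_nth_divisor, with early return; none = fell off (Python: None)
def get_nth_divisor_go (term n : Int) : List Int → Int → Option Int
  | [], _ => none
  | i :: rest, result =>
    if is_prime i && PySem.Int.mod term i == 0 then
      if result + 1 == n then some i else get_nth_divisor_go term n rest (result + 1)
    else get_nth_divisor_go term n rest result

def get_nth_divisor (term n : Int) : Option Int :=
  get_nth_divisor_go term n (PySem.List.pyRange 2 term 1) 0

-- A's while loop; fuel n.toNat suffices on Pre_ (every iteration lowers n by at least 1 or returns)
def loopA : Nat → Int → Int → Int
  | 0, _, term => term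
  | fuel+1, n, term =>
    if n == 0 then term
    else
      let t := term + 1
      if is_prime t then loopA fuel (n - 1) t
      else if number_of_divisors t < n then loopA fuel (n - number_of_divisors t) t
      else (get_nth_divisor t n).getD 0   -- the branch guarantees a value; getD only totalizes

def get_nth_term (n : Int) : Int :=
  if n == 1 then 1 else loopA n.toNat (n - 1) 1

-- ===== PORT B =====
-- 'while m % d == 0: m //= d' (2 ≤ d and 0 < m always hold at the call; guards only totalize)
def dpfStrip (d m : Nat) : Nat :=
  if h : 2 ≤ d ∧ 0 < m ∧ m % d = 0 then dpfStrip d (m / d) else m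
termination_by m
decreasing_by exact Nat.div_lt_self h.2.1 (by omega)

theorem dpfStrip_le (d m : Nat) : dpfStrip d m ≤ m := by
  fun_induction dpfStrip d m with
  | case1 m _ ih => exact le_trans ih (Nat.div_le_self m d)
  | case2 => exact le_refl _

-- 'while d*d <= m: …' of distinct_prime_factors; returns (fs, final m); 2 ≤ d only totalizes
def dpfLoop (d m : Nat) (fs : List Int) : List Int × Nat :=
  if h : 2 ≤ d ∧ d * d ≤ m then
    if m % d = 0 then dpfLoop (d+1) (dpfStrip d m) (fs ++ [(d : Int)])
    else dpfLoop (d+1) m fs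
  else (fs, m)
termination_by m - d
decreasing_by
  · have h1 : d < m := by nlinarith [h.1, h.2]
    have h2 := dpfStrip_le d m
    omega
  · have h1 : d < m := by nlinarith [h.1, h.2]
    omega

-- distinct prime factors by √ trial division (always called with a positive int: toNat is exact)
def distinct_prime_factors (mI : Int) : List Int :=
  let r := dpfLoop 2 mI.toNat []
  if 1 < r.2 then r.1 ++ [(r.2 : Int)] else r.1

def loopB : Nat → Int → Int → Int
  | 0, _, term => term
  | fuel+1, n, term =>
    let t := term + 1
    let fs := distinct_prime_factors t
    if n ≤ (fs.length : Int) then (PySem.List.pyGet? fs (n - 1)).getD 0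
    else loopB fuel (n - (fs.length : Int)) t

def get_nth_term_alt (n : Int) : Int :=
  if n == 1 then 1 else loopB n.toNat (n - 1) 1

-- ===== PRECONDITION & SPEC =====
-- Pre_ excludes n ≤ 0, where A falls off get_nth_divisor and returns None — not an int (B raises IndexError there).
def Pre_get_nth_term (n : Int) : Prop := 1 ≤ n
instance (n : Int) : Decidable (Pre_get_nth_term n) := by unfold Pre_get_nth_term; infer_instance
def pvWitness_get_nth_term : Int := 10

def Spec_get_nth_term (n : Int) (out : Int) : Prop := out = get_nth_term_alt n
instance (n : Int) (out : Int) : Decidable (Spec_get_nth_term n out) := by unfold Spec_get_nth_term; infer_instance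

-- ===== CLAIM (what is proved, stated in full; the proofs are below) =====
def Claim_equal_get_nth_term : Prop :=
  ∀ (n : Int), Dom_get_nth_term n → Pre_get_nth_term n → Spec_get_nth_term n (get_nth_term n)

-- ===== LEMMAS AND PROOFS =====

-- two strictly increasing lists with the same members are equal
theorem listEq_of_pairwise_lt {α : Type} [LinearOrder α] {l₁ l₂ : List α}
    (h₁ : l₁.Pairwise (· < ·)) (h₂ : l₂.Pairwise (· < ·))
    (hm : ∀ x, x ∈ l₁ ↔ x ∈ l₂) : l₁ = l₂ := by
  refine List.Perm.eq_of_pairwise (fun a b _ _ hab hba => absurd hba (not_lt.mpr hab.le)) h₁ h₂ ?_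
  exact (List.perm_ext_iff_of_nodup h₁.nodup h₂.nodup).mpr hm

-- sorted list of the distinct prime divisors of m
def spf (m : Nat) : List Nat := (List.range (m+1)).filter (fun p => decide (p.Prime ∧ p ∣ m))

theorem mem_spf {m p : Nat} (hm : 1 ≤ m) : p ∈ spf m ↔ p.Prime ∧ p ∣ m := by
  unfold spf
  simp only [List.mem_filter, List.mem_range, decide_eq_true_eq]
  constructor
  · exact fun h => h.2
  · intro h
    exact ⟨Nat.lt_succ_of_le (Nat.le_of_dvd hm h.2), h⟩

theorem pairwise_spf (m : Nat) : (spf m).Pairwise (· < ·) :=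
  List.Pairwise.filter _ List.pairwise_lt_range

theorem spf_one : spf 1 = [] := by decide

theorem spf_of_prime {m : Nat} (hm : m.Prime) : spf m = [m] := by
  refine listEq_of_pairwise_lt (pairwise_spf m) (by simp) (fun x => ?_)
  rw [mem_spf hm.one_lt.le]
  simp only [List.mem_singleton]
  constructor
  · intro h; exact (Nat.prime_dvd_prime_iff_eq h.1 hm).mp h.2
  · intro h; subst h; exact ⟨hm, dvd_rfl⟩

-- ---- strip facts ----
theorem dpfStrip_pos {d m : Nat} (hm : 0 < m) : 0 < dpfStrip d m := by
  fun_induction dpfStrip d m with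
  | case1 m h ih => exact ih (Nat.div_pos (Nat.le_of_dvd h.2.1 (Nat.dvd_of_mod_eq_zero h.2.2)) (by omega))
  | case2 => exact hm

theorem dpfStrip_dvd (d m : Nat) : dpfStrip d m ∣ m := by
  fun_induction dpfStrip d m with
  | case1 m h ih => exact ih.trans (Nat.div_dvd_of_dvd (Nat.dvd_of_mod_eq_zero h.2.2))
  | case2 => exact dvd_rfl

theorem dpfStrip_not_dvd {d m : Nat} (hd : 2 ≤ d) (hm : 0 < m) : ¬ d ∣ dpfStrip d m := by
  fun_induction dpfStrip d m with
  | case1 m h ih =>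
    exact ih (Nat.div_pos (Nat.le_of_dvd h.2.1 (Nat.dvd_of_mod_eq_zero h.2.2)) (by omega))
  | case2 m h =>
    intro hdvd
    exact h ⟨hd, hm, Nat.dvd_iff_mod_eq_zero.mp hdvd⟩

theorem dpfStrip_dvd_of_prime_dvd {d m p : Nat} (hdp : d.Prime) (hp : p.Prime)
    (hne : p ≠ d) (hpm : p ∣ m) : p ∣ dpfStrip d m := by
  fun_induction dpfStrip d m with
  | case1 m h ih =>
    apply ih
    have hm : m = m / d * d := (Nat.div_mul_cancel (Nat.dvd_of_mod_eq_zero h.2.2)).symm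
    rcases (Nat.Prime.dvd_mul hp).mp (hm ▸ hpm) with h' | h'
    · exact h'
    · exact absurd ((Nat.prime_dvd_prime_iff_eq hp hdp).mp h') hne
  | case2 => exact hpm

-- ---- trial-division correctness ----
theorem dpfLoop_correct (d m : Nat) (fs : List Int) :
    2 ≤ d → 1 ≤ m → (∀ p, p.Prime → p ∣ m → d ≤ p) →
    (if 1 < (dpfLoop d m fs).2 then (dpfLoop d m fs).1 ++ [((dpfLoop d m fs).2 : Int)]
     else (dpfLoop d m fs).1) = fs ++ (spf m).map (fun (p : Nat) => (p : Int)) := by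
  induction d, m, fs using dpfLoop.induct with
  | case1 d m fs h hmod ih =>
    intro hd hm hfac
    have hdvd : d ∣ m := Nat.dvd_of_mod_eq_zero hmod
    have hdp : d.Prime := by
      have hq := Nat.minFac_prime (show d ≠ 1 by omega)
      have h1 : d.minFac ≤ d := Nat.minFac_le (by omega)
      have h2 : d ≤ d.minFac := hfac d.minFac hq (dvd_trans (Nat.minFac_dvd d) hdvd)
      rwa [Nat.le_antisymm h1 h2] at hq
    have hm' : 1 ≤ dpfStrip d m := dpfStrip_pos (by omega)
    have hndvd : ¬ d ∣ dpfStrip d m := dpfStrip_not_dvd h.1 (by omega)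
    have hfac' : ∀ p, p.Prime → p ∣ dpfStrip d m → d + 1 ≤ p := by
      intro p hp hpd
      have h1 : d ≤ p := hfac p hp (hpd.trans (dpfStrip_dvd d m))
      have h2 : p ≠ d := fun he => hndvd (he ▸ hpd)
      omega
    have hspf : spf m = d :: spf (dpfStrip d m) := by
      refine listEq_of_pairwise_lt (pairwise_spf m) ?_ (fun x => ?_)
      · refine List.pairwise_cons.mpr ⟨fun x hx => ?_, pairwise_spf _⟩
        have := (mem_spf hm').mp hx
        have := hfac' x this.1 this.2
        omega
      · rw [mem_spf hm, List.mem_cons, mem_spf hm']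
        constructor
        · intro hx
          by_cases he : x = d
          · exact Or.inl he
          · exact Or.inr ⟨hx.1, dpfStrip_dvd_of_prime_dvd hdp hx.1 he hx.2⟩
        · rintro (he | hx)
          · exact he ▸ ⟨hdp, hdvd⟩
          · exact ⟨hx.1, hx.2.trans (dpfStrip_dvd d m)⟩
    rw [dpfLoop]
    simp only [h, hmod, and_self, dite_true, if_true]
    rw [ih (by omega) hm' hfac', hspf]
    simp
  | case2 d m fs h hmod ih =>
    intro hd hm hfac
    have hfac' : ∀ p, p.Prime → p ∣ m → d + 1 ≤ p := by
      intro p hp hpd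
      have h1 : d ≤ p := hfac p hp hpd
      have h2 : p ≠ d := fun he => hmod (Nat.dvd_iff_mod_eq_zero.mp (he ▸ hpd))
      omega
    rw [dpfLoop]
    simp only [h, hmod, and_self, dite_true, if_false]
    exact ih (by omega) hm hfac'
  | case3 d m fs h =>
    intro hd hm hfac
    rw [dpfLoop]
    simp only [h, dite_false]
    by_cases h1 : m = 1
    · subst h1; simp [spf_one]
    · have hmp : m.Prime := by
        by_contra hnp
        have hsq := Nat.minFac_sq_le_self (show 0 < m by omega) hnp
        have hq := Nat.minFac_prime (show m ≠ 1 by omega)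
        have hge : d ≤ m.minFac := hfac m.minFac hq (Nat.minFac_dvd m)
        have : d * d ≤ m.minFac * m.minFac := Nat.mul_le_mul hge hge
        have : d * d ≤ m := by nlinarith
        exact h ⟨hd, this⟩
      rw [spf_of_prime hmp]
      have : 1 < m := hmp.one_lt
      simp [this]

theorem distinct_prime_factors_eq (t : Nat) (ht : 2 ≤ t) :
    distinct_prime_factors (t : Int) = (spf t).map (fun (p : Nat) => (p : Int)) := by
  have h := dpfLoop_correct 2 t [] (le_refl 2) (by omega) (fun p hp _ => hp.two_le)
  simpa [distinct_prime_factors, Int.toNat_natCast] using h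

-- ---- A-side characterizations ----
theorem is_prime_iff (t : Nat) (ht : 2 ≤ t) : is_prime (t : Int) = true ↔ t.Prime := by
  by_cases h2 : t = 2
  · subst h2; simpa [is_prime] using Nat.prime_two
  have h2' : ¬ ((t : Int) = 2) := by exact_mod_cast h2
  by_cases hev : 2 ∣ t
  · have hmod : PySem.Int.mod (t : Int) 2 = 0 :=
      (PySem.Int.mod_eq_zero_iff_dvd _ _).mpr (by exact_mod_cast hev)
    have hfalse : is_prime (t : Int) = false := by
      unfold is_prime
      rw [if_neg (by simpa using h2'), if_pos (by simp; exact Or.inr (by exact_mod_cast hev))]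
    rw [hfalse]
    simp only [Bool.false_eq_true, false_iff]
    intro hp
    rcases hp.eq_one_or_self_of_dvd 2 hev with h | h <;> omega
  · have hmodne : ¬ (PySem.Int.mod (t : Int) 2 = 0) := fun hc =>
      hev (by exact_mod_cast (PySem.Int.mod_eq_zero_iff_dvd _ _).mp hc)
    have hlt : ¬ ((t : Int) < 2) := by
      rw [not_lt]; exact_mod_cast ht
    unfold is_prime
    rw [if_neg (by simpa using h2'), if_neg (by simp [hlt]; omega)]
    split
    next hany =>
      simp only [Bool.false_eq_true, false_iff]
      rw [List.any_eq_true] at hany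
      obtain ⟨i, hi, hdvd⟩ := hany
      rw [PySem.List.mem_pyRange_iff_of_pos (by norm_num)] at hi
      intro hp
      have hidvd : i ∣ (t : Int) :=
        (PySem.Int.mod_eq_zero_iff_dvd _ _).mp (by simpa using hdvd)
      obtain ⟨hi3, hit, -⟩ := hi
      lift i to Nat using (by omega) with j
      have hjd : j ∣ t := by exact_mod_cast hidvd
      have hj3 : 3 ≤ j := by exact_mod_cast hi3
      have hjt : j < t := by exact_mod_cast hit
      rcases hp.eq_one_or_self_of_dvd j hjd with h | h <;> omega
    next hany =>
      refine ⟨fun _ => ?_, fun _ => rfl⟩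
      by_contra hnp
      apply hany
      rw [List.any_eq_true]
      have hq : t.minFac.Prime := Nat.minFac_prime (by omega)
      have hqd : t.minFac ∣ t := Nat.minFac_dvd t
      have hqne : t.minFac ≠ t := fun he => hnp (he ▸ hq)
      have hqlt : t.minFac < t := lt_of_le_of_ne (Nat.le_of_dvd (by omega) hqd) hqne
      have hqodd : t.minFac ≠ 2 := fun he => hev (he ▸ hqd)
      have hq3 : 3 ≤ t.minFac := by have := hq.two_le; omega
      have hq2 : ¬ 2 ∣ t.minFac := fun h2q =>
        hqodd ((Nat.prime_dvd_prime_iff_eq Nat.prime_two hq).mp h2q).symm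
      refine ⟨(t.minFac : Int), ?_, ?_⟩
      · rw [PySem.List.mem_pyRange_iff_of_pos (by norm_num)]
        refine ⟨by exact_mod_cast hq3, by exact_mod_cast hqlt, ?_⟩
        have : t.minFac % 2 = 1 := by omega
        have hcast : (t.minFac : Int) % 2 = 1 := by omega
        omega
      · simp only [beq_iff_eq]
        exact (PySem.Int.mod_eq_zero_iff_dvd _ _).mpr (by exact_mod_cast hqd)

def filterA (t : Int) : List Int :=
  (PySem.List.pyRange 2 t 1).filter (fun i => is_prime i && PySem.Int.mod t i == 0)

theorem number_of_divisors_eq (t : Int) :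
    number_of_divisors t = ((filterA t).length : Int) := by
  unfold number_of_divisors filterA
  rw [PySem.List.foldl_count_if (fun i => is_prime i && PySem.Int.mod t i == 0)]
  simp [List.countP_eq_length_filter]

theorem get_nth_divisor_go_eq (term n : Int) (l : List Int) : ∀ (r : Int), r < n →
    get_nth_divisor_go term n l r =
      (l.filter (fun i => is_prime i && PySem.Int.mod term i == 0))[(n - r - 1).toNat]? := by
  induction l with
  | nil => intro r hr; simp [get_nth_divisor_go]
  | cons i rest ih =>
    intro r hr
    rw [get_nth_divisor_go]
    by_cases hp : (is_prime i && PySem.Int.mod term i == 0) = true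
    · rw [if_pos hp]
      have hf : List.filter (fun i => is_prime i && PySem.Int.mod term i == 0) (i :: rest)
          = i :: List.filter (fun i => is_prime i && PySem.Int.mod term i == 0) rest := by
        simp [hp]
      rw [hf]
      by_cases he : r + 1 = n
      · rw [if_pos (by simpa using he)]
        have : (n - r - 1).toNat = 0 := by omega
        simp [this]
      · rw [if_neg (by simpa using he), ih (r + 1) (by omega)]
        have h1 : (n - r - 1).toNat = (n - (r + 1) - 1).toNat + 1 := by omega
        simp [h1]
    · have hf : List.filter (fun i => is_prime i && PySem.Int.mod term i == 0) (i :: rest)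
          = List.filter (fun i => is_prime i && PySem.Int.mod term i == 0) rest := by
        simp [hp]
      rw [if_neg hp, hf, ih r hr]

theorem filterA_eq (t : Nat) (ht : 2 ≤ t) (hnp : ¬ t.Prime) :
    filterA (t : Int) = (spf t).map (fun (p : Nat) => (p : Int)) := by
  refine listEq_of_pairwise_lt ?_ ?_ (fun x => ?_)
  · exact List.Pairwise.filter _ (PySem.List.pairwise_lt_pyRange_one 2 (t : Int))
  · refine List.pairwise_map.mpr ((pairwise_spf t).imp ?_)
    intro a b hab
    exact_mod_cast hab
  · unfold filterA
    rw [List.mem_filter]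
    constructor
    · rintro ⟨hmem, hcond⟩
      rw [PySem.List.mem_pyRange_one] at hmem
      rw [Bool.and_eq_true, beq_iff_eq, PySem.Int.mod_eq_zero_iff_dvd] at hcond
      lift x to Nat using (by omega) with j
      have hj2 : 2 ≤ j := by exact_mod_cast hmem.1
      have hjp : j.Prime := (is_prime_iff j hj2).mp hcond.1
      have hjd : j ∣ t := by exact_mod_cast hcond.2
      simp only [List.mem_map]
      exact ⟨j, (mem_spf (by omega)).mpr ⟨hjp, hjd⟩, rfl⟩
    · intro hx
      simp only [List.mem_map] at hx
      obtain ⟨j, hj, rfl⟩ := hx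
      rw [mem_spf (by omega)] at hj
      have hjt : j ≠ t := fun he => hnp (he ▸ hj.1)
      have hjlt : j < t := lt_of_le_of_ne (Nat.le_of_dvd (by omega) hj.2) hjt
      have hj2 := hj.1.two_le
      refine ⟨?_, ?_⟩
      · rw [PySem.List.mem_pyRange_one]
        exact ⟨by exact_mod_cast hj2, by exact_mod_cast hjlt⟩
      · rw [Bool.and_eq_true, beq_iff_eq, PySem.Int.mod_eq_zero_iff_dvd]
        exact ⟨(is_prime_iff j hj2).mpr hj.1, by exact_mod_cast hj.2⟩

theorem loopA_zero (fuel : Nat) (term : Int) : loopA fuel 0 term = term := by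
  cases fuel <;> simp [loopA]

theorem loop_eq (fuel : Nat) : ∀ (n term : Int), 1 ≤ n → 1 ≤ term →
    loopA fuel n term = loopB fuel n term := by
  induction fuel with
  | zero => intro n term _ _; rfl
  | succ fuel ih =>
    intro n term hn hterm
    rw [loopA, loopB]
    rw [if_neg (by simp only [beq_iff_eq]; omega)]
    obtain ⟨tN, htN, htN2⟩ : ∃ tN : Nat, (term + 1 : Int) = (tN : Int) ∧ 2 ≤ tN :=
      ⟨(term + 1).toNat, by omega, by omega⟩
    by_cases hp : is_prime (term + 1) = true
    · have hprime : tN.Prime := (is_prime_iff tN htN2).mp (htN ▸ hp)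
      have hfs : distinct_prime_factors (term + 1) = [term + 1] := by
        rw [htN, distinct_prime_factors_eq tN htN2, spf_of_prime hprime]; simp
      rw [if_pos hp]
      simp only [hfs, List.length_cons, List.length_nil]
      by_cases h1 : n = 1
      · subst h1
        rw [if_pos (by norm_num)]
        norm_num [loopA_zero, PySem.List.pyGet?_zero_cons]
      · rw [if_neg (by push_cast; omega)]
        exact ih (n - 1) (term + 1) (by omega) (by omega)
    · have hnp : ¬ tN.Prime := fun hc => hp (htN ▸ (is_prime_iff tN htN2).mpr hc)
      rw [if_neg hp]
      have hfsA : filterA (term + 1) = (spf tN).map (fun (p : Nat) => (p : Int)) :=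
        htN ▸ filterA_eq tN htN2 hnp
      have hfsB : distinct_prime_factors (term + 1) = (spf tN).map (fun (p : Nat) => (p : Int)) :=
        htN ▸ distinct_prime_factors_eq tN htN2
      have hnod : number_of_divisors (term + 1) = ((filterA (term + 1)).length : Int) :=
        number_of_divisors_eq _
      have hBA : distinct_prime_factors (term + 1) = filterA (term + 1) := by rw [hfsA, hfsB]
      by_cases hlt : number_of_divisors (term + 1) < n
      · rw [if_pos hlt]
        rw [if_neg (by rw [hBA, ← hnod]; omega)]
        have hlen : 0 ≤ number_of_divisors (term + 1) := by rw [hnod]; positivity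
        rw [hnod, ← hBA] at hlt ⊢
        exact ih _ _ (by omega) (by omega)
      · rw [if_neg hlt]
        rw [if_pos (by rw [hBA, ← hnod]; omega)]
        unfold get_nth_divisor
        rw [get_nth_divisor_go_eq (term + 1) n _ 0 (by omega), hBA]
        unfold filterA
        rw [PySem.List.pyGet?_of_nonneg _ (show (0:Int) ≤ n - 1 by omega)]
        norm_num

-- ===== VERDICT (by name: the statement is the Claim_ definition above) =====
theorem get_nth_term_spec : Claim_equal_get_nth_term := by
  intro n _ hpre
  unfold Spec_get_nth_term get_nth_term get_nth_term_alt
  split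
  · rfl
  · have h1 : 1 ≤ n - 1 := by
      rename_i hne
      simp only [beq_iff_eq] at hne
      unfold Pre_get_nth_term at hpre
      omega
    exact loop_eq n.toNat (n - 1) 1 h1 (le_refl 1)
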